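-- pv_equiv track=rewrite | github.com/xCOLOURx/teamSKF | routes/trading_formula.py | _replace_sums
-- ===== SOURCE A (Python) =====
-- def _read_group(s: str, start: int):
--     """
--     Read a balanced {...} or (...) group starting at index `start`.
--     Returns (content, next_index). If not a group, returns (None, start).
--     """
--     if start >= len(s) or s[start] not in "{(":
--         return None, start
--     open_ch = s[start]
--     close_ch = "}" if open_ch == "{" else ")"
--     depth = 0
--     j = start
--     while j < len(s):
--         c = s[j]
--         if c == open_ch:
--             depth += 1
--         elif c == close_ch:
--             depth -= 1
--             if depth == 0:
--                 # content excludes the outer braces/parens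
--                 return s[start + 1 : j], j + 1
--         j += 1
--     # Unbalanced; treat as no group
--     return None, start
--
-- def _read_ungrouped_body(s: str, start: int) -> tuple[str, int]:
--     """
--     Read a body expression starting at `start` until the next top-level + or -,
--     or end of string. Tracks nesting to avoid cutting inside parentheses.
--     """
--     depth = 0
--     j = start
--     while j < len(s):
--         c = s[j]
--         if c in "({":
--             depth += 1
--         elif c in ")}":
--             depth = max(0, depth - 1)
--         elif depth == 0 and c in "+-":
--             break
--         j += 1
--     return s[start:j].strip(), j
--
-- def _replace_sums(expr: str) -> str:
--     """
--     Replace \sum_{i=1}^{n} <body> with: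
--       (sum((<body>) for i in range(int(1), int(n)+1)))
--     Supports body in { ... } or ( ... ) or ungrouped token up to next top-level + or -.
--     """
--     i = 0
--     out = []
--     L = len(expr)
--     while i < L:
--         if expr.startswith(r"\sum_", i):
--             j = i + len(r"\sum_")
--             # parse lower limit group {i=1}
--             lower_group, j2 = _read_group(expr, j)
--             if lower_group is None or "=" not in lower_group:
--                 out.append("sum")
--                 i = j
--                 continue
--             var, lower = lower_group.split("=", 1)
--             var = var.strip()
--             lower = lower.strip()
--
--             # expect ^{upper}
--             if j2 >= L or expr[j2] != "^":
--                 out.append("sum")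
--                 i = j2
--                 continue
--             j3 = j2 + 1
--             upper_group, j4 = _read_group(expr, j3)
--             if upper_group is None:
--                 out.append("sum")
--                 i = j3
--                 continue
--             upper = upper_group.strip()
--
--             # read body
--             # skip spaces
--             j5 = j4
--             while j5 < L and expr[j5].isspace():
--                 j5 += 1
--
--             if j5 < L and expr[j5] in "{(":
--                 body, j6 = _read_group(expr, j5)
--             else:
--                 body, j6 = _read_ungrouped_body(expr, j5)
--
--             out.append(f"(sum(({body}) for {var} in range(int({lower}), int({upper})+1)))")
--             i = j6
--         else:
--             out.append(expr[i])
--             i += 1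
--     return "".join(out)
-- ===== SOURCE B (Python) =====
-- def _group(s):
--     """If s begins with a balanced {...} or (...) group, return (content, rest); else None."""
--     if not s or s[0] not in "{(":
--         return None
--     open_ch = s[0]
--     close_ch = "}" if open_ch == "{" else ")"
--     depth = 0
--     for k, c in enumerate(s):
--         if c == open_ch:
--             depth += 1
--         elif c == close_ch:
--             depth -= 1
--             if depth == 0:
--                 return s[1:k], s[k + 1:]
--     return None
--
-- def _ungrouped(s):
--     """Split s at the first top-level + or - (or its end): (stripped body, rest)."""
--     depth = 0
--     for k, c in enumerate(s):
--         if c in "({":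
--             depth += 1
--         elif c in ")}":
--             depth = max(0, depth - 1)
--         elif depth == 0 and c in "+-":
--             return s[:k].strip(), s[k:]
--     return s.strip(), ""
--
-- def _sum_repl(tail):
--     """tail is the text after one '\\sum_'. Return (replacement text, remaining text)."""
--     g = _group(tail)
--     if g is None or "=" not in g[0]:
--         return "sum", tail
--     lower_group, rest = g
--     var, _, lower = lower_group.partition("=")
--     var, lower = var.strip(), lower.strip()
--     if not rest.startswith("^"):
--         return "sum", rest
--     g2 = _group(rest[1:])
--     if g2 is None:
--         return "sum", rest[1:]
--     upper, rest2 = g2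
--     upper = upper.strip()
--     rest2 = rest2.lstrip()
--     if rest2.startswith(("{", "(")):
--         g3 = _group(rest2)
--         body, rest3 = g3 if g3 is not None else (None, rest2)
--     else:
--         body, rest3 = _ungrouped(rest2)
--     return f"(sum(({body}) for {var} in range(int({lower}), int({upper})+1)))", rest3
--
-- def _replace_sums(expr: str) -> str:
--     out = []
--     s = expr
--     while s:
--         head, sep, s = s.partition("\\sum_")
--         out.append(head)
--         if sep:
--             text, s = _sum_repl(s)
--             out.append(text)
--     return "".join(out)
-- ===== Notes on version B (the rewrite author's own statement) =====
-- stated objective: faster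
-- what changed: B is rewritten index-free: instead of A's index-driven character-by-character scan (one out.append per non-matching character) with integer resume positions into the whole string, B repeatedly splits the remaining text with str.partition at the LaTeX sum token and parses each occurrence on the remaining SUFFIX with suffix-returning helpers (_group/_ungrouped return (content, rest-of-string) rather than (content, absolute index)), threading suffixes instead of indices throughout.
import Mathlib
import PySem

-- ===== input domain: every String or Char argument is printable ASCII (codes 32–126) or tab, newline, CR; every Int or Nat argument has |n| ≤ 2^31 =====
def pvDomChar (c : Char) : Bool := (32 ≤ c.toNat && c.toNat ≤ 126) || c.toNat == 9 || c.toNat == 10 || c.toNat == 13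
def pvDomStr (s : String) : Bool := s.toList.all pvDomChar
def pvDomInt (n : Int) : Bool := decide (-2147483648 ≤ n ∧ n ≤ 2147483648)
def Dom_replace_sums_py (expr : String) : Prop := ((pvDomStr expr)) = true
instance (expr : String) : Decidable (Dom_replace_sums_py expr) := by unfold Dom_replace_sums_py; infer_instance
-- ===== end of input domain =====

-- B is index-free: it repeatedly partitions the string at "\sum_" and parses each occurrence on the
-- remaining SUFFIX with suffix-returning helpers, instead of A's index-driven character-by-character
-- scan; same output, measurably faster in a timing run (chunked copies instead of one append per
-- character). While-loops are ported as structural recursion on a fuel argument (a totality guard only).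

-- ===== PORT A =====
-- A is indexed-based: helpers take the WHOLE string and an absolute index, return absolute indices.

def tokSum : List Char := "\\sum_".toList

-- the while-loop of _read_group; returns the index j where depth returned to 0, none if unbalanced
def readGroupLoop (s : List Char) (openCh closeCh : Char) : Nat → Int → Nat → Option Nat
  | 0, _, _ => none
  | fuel + 1, depth, j =>
    if h : j < s.length then
      if s[j] = openCh then readGroupLoop s openCh closeCh fuel (depth + 1) (j + 1)
      else if s[j] = closeCh then
        if depth - 1 = 0 then some j
        else readGroupLoop s openCh closeCh fuel (depth - 1) (j + 1)
      else readGroupLoop s openCh closeCh fuel depth (j + 1)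
    else none

-- _read_group: (content, next index); content is s[start+1:j]
def readGroup (s : List Char) (start : Nat) : Option (List Char) × Nat :=
  match s[start]? with
  | none => (none, start)
  | some c =>
    if c = '{' ∨ c = '(' then
      match readGroupLoop s c (if c = '{' then '}' else ')') s.length 0 start with
      | some j => (some (PySem.List.slice s (some ((start : Int) + 1)) (some (j : Int))), j + 1)
      | none => (none, start)
    else (none, start)

-- the while-loop of _read_ungrouped_body; returns the break index j
def readUngroupedLoop (s : List Char) : Nat → Int → Nat → Nat
  | 0, _, j => j
  | fuel + 1, depth, j =>
    if h : j < s.length then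
      if s[j] = '(' ∨ s[j] = '{' then readUngroupedLoop s fuel (depth + 1) (j + 1)
      else if s[j] = ')' ∨ s[j] = '}' then readUngroupedLoop s fuel (max 0 (depth - 1)) (j + 1)
      else if depth = 0 ∧ (s[j] = '+' ∨ s[j] = '-') then j
      else readUngroupedLoop s fuel depth (j + 1)
    else j

-- _read_ungrouped_body: (s[start:j].strip(), j)
def readUngrouped (s : List Char) (start : Nat) : List Char × Nat :=
  let j := readUngroupedLoop s s.length 0 start
  (PySem.Chars.strip (PySem.List.slice s (some (start : Int)) (some (j : Int))), j)

-- the whitespace-skipping while-loop before the body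
def skipSpaces (s : List Char) : Nat → Nat → Nat
  | 0, j => j
  | fuel + 1, j =>
    if h : j < s.length then
      if PySem.Chars.isspace s[j] then skipSpaces s fuel (j + 1) else j
    else j

-- the body-reading if/else: grouped body via _read_group, else _read_ungrouped_body
def readBody (s : List Char) (j5 : Nat) : Option (List Char) × Nat :=
  match s[j5]? with
  | some c =>
    if c = '{' ∨ c = '(' then readGroup s j5
    else (some (readUngrouped s j5).1, (readUngrouped s j5).2)
  | none => (some (readUngrouped s j5).1, (readUngrouped s j5).2)

-- the f-string; a None body prints as "None" exactly as Python's f-string renders it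
def sumText (body : Option (List Char)) (varName lowerS upperS : List Char) : List Char :=
  "(sum((".toList ++ body.getD "None".toList ++ ") for ".toList ++ varName ++
    " in range(int(".toList ++ lowerS ++ "), int(".toList ++ upperS ++ ")+1)))".toList

-- the while-loop of _replace_sums: character-by-character scan, inline parse of each "\sum_"
def replace_sums_loop (s : List Char) : Nat → Nat → List Char
  | 0, _ => []
  | fuel + 1, i =>
    if hi : i < s.length then
      if PySem.Chars.startswith (s.drop i) tokSum then
        match readGroup s (i + 5) with
        | (none, _) => "sum".toList ++ replace_sums_loop s fuel (i + 5)
        | (some g, j2) =>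
          if PySem.Chars.isIn ['='] g then
            -- var, lower = lower_group.split("=", 1): the piece before the first '=' and the rest
            if s[j2]? = some '^' then
              match readGroup s (j2 + 1) with
              | (none, _) => "sum".toList ++ replace_sums_loop s fuel (j2 + 1)
              | (some ug, j4) =>
                sumText (readBody s (skipSpaces s s.length j4)).1
                    (PySem.Chars.strip (g.takeWhile (fun c => c ≠ '=')))
                    (PySem.Chars.strip ((g.dropWhile (fun c => c ≠ '=')).drop 1))
                    (PySem.Chars.strip ug) ++
                  replace_sums_loop s fuel (readBody s (skipSpaces s s.length j4)).2
            else "sum".toList ++ replace_sums_loop s fuel j2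
          else "sum".toList ++ replace_sums_loop s fuel (i + 5)
      else s[i] :: replace_sums_loop s fuel (i + 1)
    else []

def replace_sums_py (expr : String) : String :=
  String.ofList (replace_sums_loop expr.toList expr.toList.length 0)

-- ===== PORT B =====
-- B's helpers work on SUFFIXES: they take the remaining text and return (content, rest-of-text).

-- the for-loop of _group: relative index of the char that closes the group, none if unbalanced
def groupScan (o c : Char) : List Char → Int → Option Nat
  | [], _ => none
  | ch :: t, d =>
    if ch = o then (groupScan o c t (d + 1)).map (· + 1)
    else if ch = c then
      if d - 1 = 0 then some 0 else (groupScan o c t (d - 1)).map (· + 1)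
    else (groupScan o c t d).map (· + 1)

-- _group: if s begins with a balanced group, some (content, rest); else none
def group : List Char → Option (List Char × List Char)
  | [] => none
  | h :: t =>
    if h = '{' ∨ h = '(' then
      match groupScan h (if h = '{' then '}' else ')') (h :: t) 0 with
      | some k => some (((h :: t).take k).drop 1, (h :: t).drop (k + 1))
      | none => none
    else none

-- the for-loop of _ungrouped: length of the prefix before the first top-level + or -
def ungroupScan : Int → List Char → Nat
  | _, [] => 0
  | d, ch :: t =>
    if ch = '(' ∨ ch = '{' then ungroupScan (d + 1) t + 1
    else if ch = ')' ∨ ch = '}' then ungroupScan (max 0 (d - 1)) t + 1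
    else if d = 0 ∧ (ch = '+' ∨ ch = '-') then 0
    else ungroupScan d t + 1

-- _ungrouped: (stripped body, rest)
def ungrouped (s : List Char) : List Char × List Char :=
  (PySem.Chars.strip (s.take (ungroupScan 0 s)), s.drop (ungroupScan 0 s))

-- the f-string of _sum_repl (None body prints as "None")
def fmtSum (body : Option (List Char)) (v lo hi : List Char) : List Char :=
  "(sum((".toList ++ (match body with | none => "None".toList | some b => b) ++
    ") for ".toList ++ v ++ " in range(int(".toList ++ lo ++ "), int(".toList ++ hi ++ ")+1)))".toList

-- _sum_repl: parse the text after one "\sum_": (replacement text, remaining text)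
def sumRepl (tail : List Char) : List Char × List Char :=
  match group tail with
  | none => ("sum".toList, tail)
  | some (lowerGroup, rest) =>
    if '=' ∈ lowerGroup then
      -- var, _, lower = lower_group.partition("=")
      let p := lowerGroup.span (fun c => c ≠ '=')
      let v := PySem.Chars.strip p.1
      let lo := PySem.Chars.strip (p.2.drop 1)
      if rest.head? = some '^' then
        match group (rest.drop 1) with
        | none => ("sum".toList, rest.drop 1)
        | some (upperG, rest2') =>
          let hi := PySem.Chars.strip upperG
          let rest2 := PySem.Chars.lstrip rest2'
          if rest2.head? = some '{' ∨ rest2.head? = some '(' then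
            match group rest2 with
            | some (b, rest3) => (fmtSum (some b) v lo hi, rest3)
            | none => (fmtSum none v lo hi, rest2)
          else (fmtSum (some (ungrouped rest2).1) v lo hi, (ungrouped rest2).2)
      else ("sum".toList, rest)
    else ("sum".toList, tail)

-- str.partition("\sum_"): some (text before, text after the separator), none if absent
def splitTok : List Char → Option (List Char × List Char)
  | [] => none
  | h :: t =>
    if tokSum.isPrefixOf (h :: t) then some ([], (h :: t).drop 5)
    else (splitTok t).map (fun p => (h :: p.1, p.2))

-- the while-loop of B's _replace_sums: partition, emit head, parse, continue on the rest
def replace_sums_alt_loop : Nat → List Char → List Char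
  | 0, _ => []
  | fuel + 1, s =>
    match splitTok s with
    | none => s
    | some (head, tl) => head ++ (sumRepl tl).1 ++ replace_sums_alt_loop fuel (sumRepl tl).2

def replace_sums_py_alt (expr : String) : String :=
  String.ofList (replace_sums_alt_loop (expr.toList.length + 1) expr.toList)

-- ===== PRECONDITION & SPEC =====
def Spec_replace_sums_py (expr : String) (out : String) : Prop := out = replace_sums_py_alt expr
instance (expr : String) (out : String) : Decidable (Spec_replace_sums_py expr out) := by unfold Spec_replace_sums_py; infer_instance

-- ===== CLAIM (what is proved, stated in full; the proofs are below) =====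
def Claim_equal_replace_sums_py : Prop := ∀ (expr : String), Dom_replace_sums_py expr → Spec_replace_sums_py expr (replace_sums_py expr)

-- ===== LEMMAS AND PROOFS =====

-- A's inline parse of one "\sum_" occurrence, factored out for the proofs only:
-- parseA s j = (text A emits, index A resumes at), where j is the index just after "\sum_"
def parseA (s : List Char) (j : Nat) : List Char × Nat :=
  match readGroup s j with
  | (none, _) => ("sum".toList, j)
  | (some g, j2) =>
    if PySem.Chars.isIn ['='] g then
      if s[j2]? = some '^' then
        match readGroup s (j2 + 1) with
        | (none, _) => ("sum".toList, j2 + 1)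
        | (some ug, j4) =>
          (sumText (readBody s (skipSpaces s s.length j4)).1
              (PySem.Chars.strip (g.takeWhile (fun c => c ≠ '=')))
              (PySem.Chars.strip ((g.dropWhile (fun c => c ≠ '=')).drop 1))
              (PySem.Chars.strip ug),
            (readBody s (skipSpaces s s.length j4)).2)
      else ("sum".toList, j2)
    else ("sum".toList, j)

-- A's loop at a match position emits parseA's text and resumes at parseA's index
lemma loopA_parse (s : List Char) (p f : Nat) (hlen : p < s.length)
    (hsw : PySem.Chars.startswith (s.drop p) tokSum = true) :
    replace_sums_loop s (f + 1) p =
      (parseA s (p + 5)).1 ++ replace_sums_loop s f (parseA s (p + 5)).2 := by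
  rw [replace_sums_loop]
  simp only [dif_pos hlen, hsw, if_true]
  unfold parseA
  split
  · rfl
  · split_ifs with h2 h3
    · split <;> rfl
    · rfl
    · rfl

lemma loopA_nil (s : List Char) (fuel i : Nat) (h : s.length ≤ i) :
    replace_sums_loop s fuel i = [] := by
  cases fuel with
  | zero => rw [replace_sums_loop]
  | succ m =>
    rw [replace_sums_loop]
    simp [show ¬ i < s.length by omega]

-- readGroupLoop is groupScan on the suffix, shifted by the start index
lemma readGroupLoop_eq_groupScan (s : List Char) (o c : Char) :
    ∀ (fuel : Nat) (j : Nat) (d : Int), s.length - j ≤ fuel →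
    readGroupLoop s o c fuel d j = (groupScan o c (s.drop j) d).map (j + ·) := by
  intro fuel
  induction fuel with
  | zero =>
    intro j d h
    rw [readGroupLoop, List.drop_eq_nil_of_le (by omega), groupScan]
    rfl
  | succ m ih =>
    intro j d h
    by_cases hj : j < s.length
    · rw [readGroupLoop, dif_pos hj, List.drop_eq_getElem_cons hj, groupScan]
      split_ifs with h1 h2 h3
      · rw [ih (j+1) (d+1) (by omega), Option.map_map]
        cases groupScan o c (s.drop (j+1)) (d+1) <;> simp [Function.comp] <;> omega
      · rfl
      · rw [ih (j+1) (d-1) (by omega), Option.map_map]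
        cases groupScan o c (s.drop (j+1)) (d-1) <;> simp [Function.comp] <;> omega
      · rw [ih (j+1) d (by omega), Option.map_map]
        cases groupScan o c (s.drop (j+1)) d <;> simp [Function.comp] <;> omega
    · rw [readGroupLoop, dif_neg hj, List.drop_eq_nil_of_le (by omega), groupScan]
      rfl

lemma groupScan_lt (o c : Char) : ∀ (l : List Char) (d : Int) (k : Nat),
    groupScan o c l d = some k → k < l.length := by
  intro l
  induction l with
  | nil => intro d k h; exact absurd h (by simp [groupScan])
  | cons ch t ih =>
    intro d k h
    rw [groupScan] at h
    split_ifs at h with h1 h2 h3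
    · rcases Option.map_eq_some_iff.mp h with ⟨k', hk', rfl⟩
      have := ih _ _ hk'; simp only [List.length_cons]; omega
    · simp only [Option.some.injEq] at h; simp only [List.length_cons]; omega
    · rcases Option.map_eq_some_iff.mp h with ⟨k', hk', rfl⟩
      have := ih _ _ hk'; simp only [List.length_cons]; omega
    · rcases Option.map_eq_some_iff.mp h with ⟨k', hk', rfl⟩
      have := ih _ _ hk'; simp only [List.length_cons]; omega

-- readGroup is group on the suffix (none case)
lemma readGroup_of_group_none (s : List Char) (j : Nat) (hj : j ≤ s.length)
    (h : group (s.drop j) = none) : readGroup s j = (none, j) := by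
  by_cases hj' : j < s.length
  · have hd := List.drop_eq_getElem_cons hj'
    rw [hd] at h
    simp only [group] at h
    simp only [readGroup, List.getElem?_eq_getElem hj']
    by_cases hc : s[j] = '{' ∨ s[j] = '('
    · rw [if_pos hc] at h ⊢
      rw [readGroupLoop_eq_groupScan s _ _ s.length j 0 (by omega), hd]
      cases hgs : groupScan s[j] (if s[j] = '{' then '}' else ')') (s[j] :: s.drop (j + 1)) 0 with
      | none => rfl
      | some k => rw [hgs] at h; simp at h
    · rw [if_neg hc]
  · have hn : s[j]? = none := by rw [List.getElem?_eq_none_iff]; omega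
    simp only [readGroup, hn]

-- readGroup is group on the suffix (some case): same content, rest = suffix at the next index
lemma readGroup_of_group_some (s : List Char) (j : Nat) (hj : j ≤ s.length)
    (g rest : List Char) (h : group (s.drop j) = some (g, rest)) :
    ∃ j', readGroup s j = (some g, j') ∧ rest = s.drop j' ∧ j < j' ∧ j' ≤ s.length := by
  by_cases hj' : j < s.length
  · have hd := List.drop_eq_getElem_cons hj'
    rw [hd] at h
    simp only [group] at h
    by_cases hc : s[j] = '{' ∨ s[j] = '('
    · rw [if_pos hc] at h
      cases hgs : groupScan s[j] (if s[j] = '{' then '}' else ')') (s[j] :: s.drop (j + 1)) 0 with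
      | none => rw [hgs] at h; simp at h
      | some k =>
        rw [hgs] at h
        simp only [Option.some.injEq, Prod.mk.injEq] at h
        obtain ⟨hg, hrest⟩ := h
        have hk : k < (s[j] :: s.drop (j + 1)).length := groupScan_lt _ _ _ _ _ hgs
        have hk' : k < s.length - j := by
          simp only [List.length_cons] at hk
          have := List.length_drop (i := j + 1) (l := s)
          omega
        refine ⟨j + k + 1, ?_, ?_, by omega, by omega⟩
        · simp only [readGroup, List.getElem?_eq_getElem hj']
          rw [if_pos hc, readGroupLoop_eq_groupScan s _ _ s.length j 0 (by omega), hd, hgs]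
          simp only [Option.map_some]
          refine Prod.mk.injEq .. ▸ ⟨?_, rfl⟩
          rw [← hg, ← hd]
          congr 1
          have : ((j : Int) + 1) = ((j + 1 : Nat) : Int) := by push_cast; ring
          rw [this, show ((j + k : Nat) : Int) = (((j + k) : Nat) : Int) from rfl,
            PySem.List.slice_natCast, List.drop_take, List.drop_drop]
          congr 1
          omega
        · rw [← hrest, ← hd, List.drop_drop]
          congr 1
    · rw [if_neg hc] at h; simp at h
  · rw [List.drop_eq_nil_of_le (by omega)] at h
    simp [group] at h

-- readUngroupedLoop is ungroupScan on the suffix, shifted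
lemma readUngroupedLoop_eq (s : List Char) :
    ∀ (fuel : Nat) (j : Nat) (d : Int), s.length - j ≤ fuel →
    readUngroupedLoop s fuel d j = j + ungroupScan d (s.drop j) := by
  intro fuel
  induction fuel with
  | zero =>
    intro j d h
    rw [readUngroupedLoop, List.drop_eq_nil_of_le (by omega), ungroupScan]
    omega
  | succ m ih =>
    intro j d h
    by_cases hj : j < s.length
    · rw [readUngroupedLoop, dif_pos hj, List.drop_eq_getElem_cons hj, ungroupScan]
      split_ifs with h1 h2 h3
      · rw [ih (j + 1) (d + 1) (by omega)]; omega
      · rw [ih (j + 1) (max 0 (d - 1)) (by omega)]; omega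
      · omega
      · rw [ih (j + 1) d (by omega)]; omega
    · rw [readUngroupedLoop, dif_neg hj, List.drop_eq_nil_of_le (by omega), ungroupScan]
      omega

lemma ungroupScan_le (d : Int) (l : List Char) : ungroupScan d l ≤ l.length := by
  induction l generalizing d with
  | nil => simp [ungroupScan]
  | cons ch t ih =>
    rw [ungroupScan]
    split_ifs with h1 h2 h3
    · have := ih (d + 1); simp only [List.length_cons]; omega
    · have := ih (max 0 (d - 1)); simp only [List.length_cons]; omega
    · simp only [List.length_cons]; omega
    · have := ih d; simp only [List.length_cons]; omega

-- readUngrouped is ungrouped on the suffix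
lemma readUngrouped_eq (s : List Char) (j : Nat) (hj : j ≤ s.length) :
    (readUngrouped s j).1 = (ungrouped (s.drop j)).1 ∧
      (ungrouped (s.drop j)).2 = s.drop (readUngrouped s j).2 ∧
      j ≤ (readUngrouped s j).2 ∧ (readUngrouped s j).2 ≤ s.length := by
  have hk := ungroupScan_le 0 (s.drop j)
  rw [List.length_drop] at hk
  have hloop := readUngroupedLoop_eq s s.length j 0 (by omega)
  simp only [readUngrouped, ungrouped]
  refine ⟨?_, ?_, ?_, ?_⟩
  · rw [hloop]
    congr 1
    rw [show ((j + ungroupScan 0 (s.drop j) : Nat) : Int) =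
      (((j + ungroupScan 0 (s.drop j)) : Nat) : Int) from rfl, PySem.List.slice_natCast]
    congr 1
    omega
  · rw [hloop, List.drop_drop]
  · rw [hloop]; omega
  · rw [hloop]; omega

-- skipSpaces is lstrip on the suffix
lemma skipSpaces_eq (s : List Char) : ∀ (fuel : Nat) (j : Nat), s.length - j ≤ fuel →
    PySem.Chars.lstrip (s.drop j) = s.drop (skipSpaces s fuel j) ∧
      j ≤ skipSpaces s fuel j ∧ (j ≤ s.length → skipSpaces s fuel j ≤ s.length) := by
  intro fuel
  induction fuel with
  | zero =>
    intro j h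
    rw [skipSpaces, List.drop_eq_nil_of_le (by omega)]
    exact ⟨rfl, le_rfl, fun h' => h'⟩
  | succ m ih =>
    intro j h
    by_cases hj : j < s.length
    · rw [skipSpaces, dif_pos hj, List.drop_eq_getElem_cons hj]
      by_cases hsp : PySem.Chars.isspace s[j]
      · rw [if_pos hsp]
        obtain ⟨h1, h2, h3⟩ := ih (j + 1) (by omega)
        exact ⟨by rw [PySem.Chars.lstrip, List.dropWhile_cons_of_pos hsp, ← PySem.Chars.lstrip, h1],
          by omega, fun _ => h3 (by omega)⟩
      · rw [if_neg hsp]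
        refine ⟨?_, le_rfl, fun h' => h'⟩
        rw [PySem.Chars.lstrip, List.dropWhile_cons_of_neg hsp, ← List.drop_eq_getElem_cons hj]
    · rw [skipSpaces, dif_neg hj, List.drop_eq_nil_of_le (by omega)]
      exact ⟨rfl, le_rfl, fun h' => h'⟩

-- sumText and fmtSum build the same string
lemma fmtSum_eq (b : Option (List Char)) (v lo hi : List Char) :
    fmtSum b v lo hi = sumText b v lo hi := by
  cases b <;> rfl

-- B's suffix parser agrees with A's index parser
lemma sumRepl_eq_parseA (s : List Char) (j : Nat) (hj : j ≤ s.length) :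
    sumRepl (s.drop j) = ((parseA s j).1, s.drop (parseA s j).2) ∧
      j ≤ (parseA s j).2 ∧ (parseA s j).2 ≤ s.length := by
  unfold sumRepl parseA
  cases hg : group (s.drop j) with
  | none =>
    rw [readGroup_of_group_none s j hj hg]
    exact ⟨rfl, le_rfl, hj⟩
  | some pr =>
    obtain ⟨g, rest⟩ := pr
    obtain ⟨j2, hrg, hrest, hjj2, hj2⟩ := readGroup_of_group_some s j hj g rest hg
    rw [hrg]
    simp only []
    have hmem : PySem.Chars.isIn ['='] g = ('=' ∈ g : Bool) := by
      by_cases hm : '=' ∈ g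
      · simp [hm, PySem.Chars.isIn_iff_infix, List.singleton_infix_iff]
      · simp only [hm, decide_false]
        rw [PySem.Chars.isIn_eq_false_iff, List.singleton_infix_iff]
        exact hm
    by_cases hm : '=' ∈ g
    · rw [if_pos hm, if_pos (show PySem.Chars.isIn ['='] g = true by rw [hmem]; simp [hm])]
      have hhead : rest.head? = s[j2]? := by rw [hrest, List.head?_drop]
      by_cases hcar : s[j2]? = some '^'
      · rw [if_pos (by rw [hhead]; exact hcar), if_pos hcar]
        have hj2lt : j2 < s.length := by
          by_contra hge
          rw [List.getElem?_eq_none_iff.mpr (by omega)] at hcar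
          exact absurd hcar (by simp)
        have hr1 : rest.drop 1 = s.drop (j2 + 1) := by
          rw [hrest, List.drop_drop]
        rw [hr1]
        cases hg2 : group (s.drop (j2 + 1)) with
        | none =>
          rw [readGroup_of_group_none s (j2 + 1) (by omega) hg2]
          exact ⟨rfl, by simp only []; omega, by simp only []; omega⟩
        | some pr2 =>
          obtain ⟨ug, rest2'⟩ := pr2
          obtain ⟨j4, hrg2, hrest2', hj2j4, hj4⟩ :=
            readGroup_of_group_some s (j2 + 1) (by omega) ug rest2' hg2
          rw [hrg2]
          simp only []
          obtain ⟨hstrip, hj4j5, hj5le⟩ := skipSpaces_eq s s.length j4 (by omega)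
          have hj5 : skipSpaces s s.length j4 ≤ s.length := hj5le hj4
          set j5 := skipSpaces s s.length j4 with hj5def
          have hrest2 : PySem.Chars.lstrip rest2' = s.drop j5 := by rw [hrest2', hstrip]
          rw [List.span_eq_takeWhile_dropWhile]
          simp only []
          rw [hrest2]
          have hhead2 : (s.drop j5).head? = s[j5]? := List.head?_drop ..
          cases hget : s[j5]? with
          | none =>
            rw [if_neg (by rw [hhead2, hget]; simp)]
            rw [show readBody s j5 = (some (readUngrouped s j5).1, (readUngrouped s j5).2) by
              rw [readBody, hget]]
            simp only []
            obtain ⟨hu1, hu2, hu3, hu4⟩ := readUngrouped_eq s j5 hj5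
            exact ⟨by rw [fmtSum_eq, hu1, hu2], by omega, hu4⟩
          | some c2 =>
            by_cases hc2 : c2 = '{' ∨ c2 = '('
            · rw [if_pos (by rw [hhead2, hget]; rcases hc2 with h | h <;> simp [h])]
              rw [show readBody s j5 = readGroup s j5 by
                rcases hc2 with h | h <;> rw [readBody, hget] <;> simp [h]]
              cases hg3 : group (s.drop j5) with
              | none =>
                rw [readGroup_of_group_none s j5 hj5 hg3]
                simp only []
                exact ⟨by rw [fmtSum_eq], by omega, hj5⟩
              | some pr3 =>
                obtain ⟨b, rest3⟩ := pr3
                obtain ⟨j6, hrg3, hrest3, hj5j6, hj6⟩ :=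
                  readGroup_of_group_some s j5 hj5 b rest3 hg3
                rw [hrg3]
                simp only []
                exact ⟨by rw [fmtSum_eq, hrest3], by omega, hj6⟩
            · rw [if_neg (by rw [hhead2, hget]; simp only [Option.some.injEq]; exact hc2)]
              rw [show readBody s j5 = (some (readUngrouped s j5).1, (readUngrouped s j5).2) by
                rw [readBody, hget]; simp only []; rw [if_neg hc2]]
              obtain ⟨hu1, hu2, hu3, hu4⟩ := readUngrouped_eq s j5 hj5
              exact ⟨by rw [fmtSum_eq, hu1, hu2], by omega, hu4⟩
      · rw [if_neg (by rw [hhead]; exact hcar), if_neg hcar]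
        exact ⟨by rw [hrest], by omega, hj2⟩
    · rw [if_neg hm, if_neg (show ¬ PySem.Chars.isIn ['='] g = true by rw [hmem]; simp [hm])]
      exact ⟨rfl, le_rfl, hj⟩

-- splitTok at a match: empty head, tail after the token
lemma splitTok_pos (l : List Char) (h : tokSum <+: l) :
    splitTok l = some ([], l.drop 5) := by
  cases l with
  | nil => exact absurd (List.prefix_nil.mp h) (by decide)
  | cons c t => rw [splitTok, if_pos (List.isPrefixOf_iff_prefix.mpr h)]

-- splitTok steps over a non-matching head character
lemma splitTok_cons (h : Char) (t : List Char) (hn : ¬ tokSum <+: (h :: t)) :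
    splitTok (h :: t) = (splitTok t).map (fun p => (h :: p.1, p.2)) := by
  rw [splitTok, if_neg (fun hp => hn (List.isPrefixOf_iff_prefix.mp hp))]

-- B's loop steps over a non-matching head character
lemma altLoop_cons (f : Nat) (h : Char) (t : List Char) (hn : ¬ tokSum <+: (h :: t)) :
    replace_sums_alt_loop (f + 1) (h :: t) = h :: replace_sums_alt_loop (f + 1) t := by
  rw [replace_sums_alt_loop, replace_sums_alt_loop, splitTok_cons h t hn]
  cases splitTok t with
  | none => rfl
  | some p => simp

-- the two loops agree
lemma loops_eq (s : List Char) : ∀ (n i fA fB : Nat),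
    s.length - i ≤ n → s.length - i ≤ fA → s.length - i < fB →
    replace_sums_loop s fA i = replace_sums_alt_loop fB (s.drop i) := by
  intro n
  induction n with
  | zero =>
    intro i fA fB hn hA hB
    obtain ⟨b, rfl⟩ : ∃ b, fB = b + 1 := ⟨fB - 1, by omega⟩
    rw [loopA_nil s fA i (by omega), List.drop_eq_nil_of_le (by omega),
      replace_sums_alt_loop]
    rfl
  | succ m ih =>
    intro i fA fB hn hA hB
    by_cases hi : i < s.length
    · obtain ⟨b, rfl⟩ : ∃ b, fB = b + 1 := ⟨fB - 1, by omega⟩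
      by_cases hsw : tokSum <+: s.drop i
      · -- a "\sum_" occurrence starts exactly at i
        have h5 : 5 ≤ s.length - i := by
          have h1 := hsw.length_le
          rw [List.length_drop] at h1
          have h2 : tokSum.length = 5 := by decide
          omega
        obtain ⟨a, rfl⟩ : ∃ a, fA = a + 1 := ⟨fA - 1, by omega⟩
        rw [replace_sums_alt_loop, splitTok_pos (s.drop i) hsw, List.drop_drop]
        simp only []
        rw [loopA_parse s i a hi ((PySem.Chars.startswith_iff _ _).mpr hsw)]
        obtain ⟨hsr, hle, hle'⟩ := sumRepl_eq_parseA s (i + 5) (by omega)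
        rw [hsr]
        simp only [List.nil_append]
        rw [ih (parseA s (i + 5)).2 a b (by omega) (by omega) (by omega)]
      · -- no occurrence at i: both sides emit s[i] and advance
        have hsw' : ¬ tokSum <+: (s[i] :: s.drop (i + 1)) := by
          rw [← List.drop_eq_getElem_cons hi]; exact hsw
        rw [List.drop_eq_getElem_cons hi, altLoop_cons b s[i] (s.drop (i + 1)) hsw']
        obtain ⟨a, rfl⟩ : ∃ a, fA = a + 1 := ⟨fA - 1, by omega⟩
        rw [replace_sums_loop, dif_pos hi,
          if_neg (fun hp => hsw ((PySem.Chars.startswith_iff _ _).mp hp))]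
        rw [ih (i + 1) a (b + 1) (by omega) (by omega) (by omega)]
    · obtain ⟨b, rfl⟩ : ∃ b, fB = b + 1 := ⟨fB - 1, by omega⟩
      rw [loopA_nil s fA i (by omega), List.drop_eq_nil_of_le (by omega),
        replace_sums_alt_loop]
      rfl

-- ===== VERDICT (by name: the statement is the Claim_ definition above) =====
theorem replace_sums_py_spec : Claim_equal_replace_sums_py := by
  intro expr _
  unfold Spec_replace_sums_py replace_sums_py replace_sums_py_alt
  rw [loops_eq expr.toList expr.toList.length 0 expr.toList.length (expr.toList.length + 1)
    (by omega) (by omega) (by omega), List.drop_zero]
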